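-- pv_equiv track=rewrite | github.com/dazeeeed/lychee-management | test_photos/getColor.py | indexOfMaxAndsecondMax
-- ===== SOURCE A (Python) =====
-- import math
--
-- def indexOfMaxAndsecondMax(l):
--     max=sec_max=-math.inf
--     idx_max=idx_sec_max=-1
--     for i,v in enumerate(l):
--         if v > max:
--             sec_max = max
--             idx_sec_max=idx_max
--             max = v
--             idx_max=i
--         elif v > sec_max and v != max:
--             sec_max = v
--             idx_sec_max=i
--     return idx_max,idx_sec_max
-- ===== SOURCE B (Python) =====
-- import math
--
-- def indexOfMaxAndsecondMax(l):
--     # pass 1: max value and its first index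
--     m = -math.inf
--     idx_max = -1
--     for i, v in enumerate(l):
--         if v > m:
--             m = v
--             idx_max = i
--     # pass 2: largest value strictly below the max (first index)
--     s = -math.inf
--     idx_sec = -1
--     for i, v in enumerate(l):
--         if v > s and v != m:
--             s = v
--             idx_sec = i
--     return idx_max, idx_sec
-- ===== Notes on version B (the rewrite author's own statement) =====
-- stated objective: alternative
-- what changed: Replaces A's single joint-tracking scan (with max-demotion into second-max) by two independent sequential scans: one plain running-max pass, then a pass for the largest value strictly below that max.
import Mathlib
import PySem

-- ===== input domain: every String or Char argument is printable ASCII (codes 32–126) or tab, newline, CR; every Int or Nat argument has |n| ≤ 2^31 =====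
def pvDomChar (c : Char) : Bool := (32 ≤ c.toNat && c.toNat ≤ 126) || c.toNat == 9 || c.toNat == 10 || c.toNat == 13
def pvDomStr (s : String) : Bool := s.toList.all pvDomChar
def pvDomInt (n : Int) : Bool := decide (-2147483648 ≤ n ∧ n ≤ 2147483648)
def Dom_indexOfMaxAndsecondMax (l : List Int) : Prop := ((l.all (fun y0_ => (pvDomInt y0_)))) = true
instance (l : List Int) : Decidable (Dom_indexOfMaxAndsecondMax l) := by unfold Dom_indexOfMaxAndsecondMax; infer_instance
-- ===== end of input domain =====

-- B replaces A's single joint-tracking scan by two independent scans (running max, then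
-- largest value strictly below the max); same O(n) cost, different decomposition.
-- `-math.inf` is modelled by `none : Option Int`: `v > -inf` and `v != -inf` hold for every int.

-- ===== PORT A =====
-- `v > cur` with cur possibly -inf
def pvGtO (v : Int) : Option Int → Bool
  | none => true
  | some m => decide (m < v)

-- `v != cur` with cur possibly -inf
def pvNeO (v : Int) : Option Int → Bool
  | none => true
  | some m => decide (v ≠ m)

-- A's loop: state (max, sec_max, idx_max, idx_sec_max), i the enumerate index
def pvStA : List Int → Int → Option Int → Option Int → Int → Int → Option Int × Option Int × Int × Int
  | [], _, mx, sx, im, isx => (mx, sx, im, isx)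
  | v :: rest, i, mx, sx, im, isx =>
    if pvGtO v mx then pvStA rest (i+1) (some v) mx i im
    else if pvGtO v sx && pvNeO v mx then pvStA rest (i+1) mx (some v) im i
    else pvStA rest (i+1) mx sx im isx

def indexOfMaxAndsecondMax (l : List Int) : Int × Int :=
  let st := pvStA l 0 none none (-1) (-1)
  (st.2.2.1, st.2.2.2)

-- ===== PORT B =====
-- pass 1: running max with first index
def pvStM : List Int → Int → Option Int → Int → Option Int × Int
  | [], _, m, im => (m, im)
  | v :: rest, i, m, im =>
    if pvGtO v m then pvStM rest (i+1) (some v) i else pvStM rest (i+1) m im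

-- pass 2: largest value ≠ M (the max), with first index
def pvStS (M : Option Int) : List Int → Int → Option Int → Int → Option Int × Int
  | [], _, s, isx => (s, isx)
  | v :: rest, i, s, isx =>
    if pvGtO v s && pvNeO v M then pvStS M rest (i+1) (some v) i else pvStS M rest (i+1) s isx

def indexOfMaxAndsecondMax_alt (l : List Int) : Int × Int :=
  let p1 := pvStM l 0 none (-1)
  let p2 := pvStS p1.1 l 0 none (-1)
  (p1.2, p2.2)

-- ===== PRECONDITION & SPEC =====
def Spec_indexOfMaxAndsecondMax (l : List Int) (out : Int × Int) : Prop := out = indexOfMaxAndsecondMax_alt l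
instance (l : List Int) (out : Int × Int) : Decidable (Spec_indexOfMaxAndsecondMax l out) := by unfold Spec_indexOfMaxAndsecondMax; infer_instance

-- ===== CLAIM (what is proved, stated in full; the proofs are below) =====
def Claim_equal_indexOfMaxAndsecondMax : Prop := ∀ (l : List Int), Dom_indexOfMaxAndsecondMax l → Spec_indexOfMaxAndsecondMax l (indexOfMaxAndsecondMax l)

-- ===== LEMMAS AND PROOFS =====

theorem pvStA_append (p q : List Int) : ∀ (i : Int) (mx sx : Option Int) (im isx : Int),
    pvStA (p ++ q) i mx sx im isx =
      (let r := pvStA p i mx sx im isx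
       pvStA q (i + p.length) r.1 r.2.1 r.2.2.1 r.2.2.2) := by
  induction p with
  | nil => intro i mx sx im isx; simp [pvStA]
  | cons v rest ih =>
    intro i mx sx im isx
    simp only [List.cons_append, pvStA, List.length_cons]
    split_ifs <;> rw [ih] <;> push_cast <;> ring_nf

theorem pvStM_append (p q : List Int) : ∀ (i : Int) (m : Option Int) (im : Int),
    pvStM (p ++ q) i m im = (let r := pvStM p i m im; pvStM q (i + p.length) r.1 r.2) := by
  induction p with
  | nil => intro i m im; simp [pvStM]
  | cons v rest ih =>
    intro i m im
    simp only [List.cons_append, pvStM, List.length_cons]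
    split_ifs <;> rw [ih] <;> push_cast <;> ring_nf

theorem pvStS_append (M : Option Int) (p q : List Int) : ∀ (i : Int) (s : Option Int) (isx : Int),
    pvStS M (p ++ q) i s isx = (let r := pvStS M p i s isx; pvStS M q (i + p.length) r.1 r.2) := by
  induction p with
  | nil => intro i s isx; simp [pvStS]
  | cons v rest ih =>
    intro i s isx
    simp only [List.cons_append, pvStS, List.length_cons]
    split_ifs <;> rw [ih] <;> push_cast <;> ring_nf

-- the running max never decreases
theorem pvStM_mono (p : List Int) : ∀ (i : Int) (im a : Int),
    ∃ b, (pvStM p i (some a) im).1 = some b ∧ a ≤ b := by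
  induction p with
  | nil => intro i im a; exact ⟨a, by simp [pvStM], le_refl a⟩
  | cons v rest ih =>
    intro i im a
    simp only [pvStM]
    split_ifs with hg
    · obtain ⟨b, hb, hvb⟩ := ih (i+1) i v
      refine ⟨b, hb, le_trans ?_ hvb⟩
      simp [pvGtO] at hg; omega
    · exact ih (i+1) im a

-- every element of p is ≤ the final running max
theorem pvStM_elem_le (p : List Int) : ∀ (i : Int) (m : Option Int) (im : Int), ∀ v ∈ p,
    ∃ b, (pvStM p i m im).1 = some b ∧ v ≤ b := by
  induction p with
  | nil => intro _ _ _ v hv; cases hv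
  | cons u rest ih =>
    intro i m im v hv
    simp only [pvStM]
    rcases List.mem_cons.1 hv with h | h
    · subst h
      split_ifs with hg
      · exact pvStM_mono rest (i+1) i v
      · cases m with
        | none => simp [pvGtO] at hg
        | some a =>
          simp only [pvGtO, decide_eq_true_eq] at hg
          rw [not_lt] at hg
          obtain ⟨b, hb, hab⟩ := pvStM_mono rest (i+1) im a
          exact ⟨b, hb, le_trans hg hab⟩
    · split_ifs <;> exact ih _ _ _ v h

-- when no element of p equals M, the second-max pass is the plain max pass
theorem pvStS_eq_pvStM (M : Option Int) (p : List Int) : ∀ (i : Int) (s : Option Int) (isx : Int),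
    (∀ v ∈ p, pvNeO v M = true) → pvStS M p i s isx = pvStM p i s isx := by
  induction p with
  | nil => intro _ _ _ _; simp [pvStS, pvStM]
  | cons v rest ih =>
    intro i s isx h
    have hv : pvNeO v M = true := h v (List.mem_cons_self ..)
    simp only [pvStS, pvStM, hv, Bool.and_true]
    split_ifs <;> exact ih _ _ _ (fun w hw => h w (List.mem_cons_of_mem _ hw))

-- A's state after the whole list = B's two passes
theorem pvKey (l : List Int) :
    pvStA l 0 none none (-1) (-1) =
      ((pvStM l 0 none (-1)).1,
       (pvStS (pvStM l 0 none (-1)).1 l 0 none (-1)).1,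
       (pvStM l 0 none (-1)).2,
       (pvStS (pvStM l 0 none (-1)).1 l 0 none (-1)).2) := by
  induction l using List.reverseRecOn with
  | nil => simp [pvStA, pvStM, pvStS]
  | append_singleton p x ih =>
    obtain ⟨m, im, hr⟩ : ∃ m im, (m, im) = pvStM p 0 none (-1) := ⟨_, _, rfl⟩
    by_cases hg : pvGtO x m = true
    · -- x is a new max: A demotes (m, im) into second place; B's pass 2 with M = some x
      -- reduces to pass 1 over p (no element of p equals x), then skips x itself.
      have h1 : pvStM (p ++ [x]) 0 none (-1) = (some x, (p.length : Int)) := by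
        rw [pvStM_append, ← hr]; simp [pvStM, hg]
      have hne : ∀ v ∈ p, pvNeO v (some x) = true := by
        intro v hv
        obtain ⟨b, hb, hvb⟩ := pvStM_elem_le p 0 none (-1) v hv
        rw [← hr] at hb
        have hbx : b < x := by
          cases hb; simpa [pvGtO] using hg
        simp [pvNeO]; omega
      have h2 : pvStS (some x) (p ++ [x]) 0 none (-1) = (m, im) := by
        rw [pvStS_append, pvStS_eq_pvStM (some x) p _ _ _ hne, ← hr]
        simp [pvStS, pvNeO]
      rw [pvStA_append, ih, ← hr, h1, h2]
      simp [pvStA, hg]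
    · -- max unchanged: both sides apply the same elif test to x at index p.length
      have h1 : pvStM (p ++ [x]) 0 none (-1) = (m, im) := by
        rw [pvStM_append, ← hr]; simp [pvStM, hg]
      rw [pvStA_append, ih, ← hr, h1]
      obtain ⟨s, isx, hs⟩ : ∃ s isx, (s, isx) = pvStS m p 0 none (-1) := ⟨_, _, rfl⟩
      rw [pvStS_append, ← hs]
      simp only [pvStA, pvStS, hg, if_false, Bool.false_eq_true]
      split_ifs <;> simp

-- ===== VERDICT (by name: the statement is the Claim_ definition above) =====
theorem indexOfMaxAndsecondMax_spec : Claim_equal_indexOfMaxAndsecondMax := by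
  intro l _
  unfold Spec_indexOfMaxAndsecondMax indexOfMaxAndsecondMax indexOfMaxAndsecondMax_alt
  rw [pvKey]
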